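-- pv_equiv track=rewrite | github.com/Adam-Vandervorst/RangeOptimization | src/pattern.py | minimal_seq
-- ===== SOURCE A (Python) =====
-- def minimal_seq(xs: list[int]) -> list[int]:
--     # `minimal_seq(xs)` returns the minimal sequence `r` such that `cycle(r) = cycle(xs)`
--     # cycle([25, 24, 25, 24]) == cycle([25, 24])
--     # cycle([4, 4, 4]) == cycle([4])
--     # cycle([1, 2, 3]) == cycle([1, 2, 3])
--     n = len(xs)
--     pi = [0] * n
--     for i in range(1, n):
--         k = pi[i - 1]
--         while k > 0 and xs[k] != xs[i]:
--             k = pi[k - 1]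
--         if xs[k] == xs[i]:
--             pi[i] = k + 1
--         else:
--             pi[i] = 0
--     p = n - pi[-1]
--     return xs[:p]
-- ===== SOURCE B (Python) =====
-- def minimal_seq(xs: list[int]) -> list[int]:
--     # Directly find the longest proper border (prefix == suffix) of the whole
--     # list by slice comparison, instead of building a KMP failure array.
--     n = len(xs)
--     b = max(L for L in range(n) if xs[:L] == xs[n - L:])
--     return xs[:n - b]
-- ===== Notes on version B (the rewrite author's own statement) =====
-- stated objective: simpler
-- what changed: Replaces the KMP failure-array loop by a direct max over L of a prefix-vs-suffix slice comparison to find the longest proper border of the whole list.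
import Mathlib
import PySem

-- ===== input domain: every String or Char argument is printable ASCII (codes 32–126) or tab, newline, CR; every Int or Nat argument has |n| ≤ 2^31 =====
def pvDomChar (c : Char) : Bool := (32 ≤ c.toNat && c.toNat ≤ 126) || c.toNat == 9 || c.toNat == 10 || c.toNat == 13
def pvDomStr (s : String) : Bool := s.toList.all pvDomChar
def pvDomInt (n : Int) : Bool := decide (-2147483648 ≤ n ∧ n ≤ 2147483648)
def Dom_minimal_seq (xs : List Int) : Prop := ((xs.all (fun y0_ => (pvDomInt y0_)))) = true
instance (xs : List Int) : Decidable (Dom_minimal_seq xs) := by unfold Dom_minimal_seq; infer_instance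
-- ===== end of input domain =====

-- B is SIMPLER, not faster: it finds the longest proper border of the whole
-- list by direct prefix-vs-suffix comparison instead of A's KMP failure array.

-- ===== PORT A =====
-- the 'while k > 0 and xs[k] != xs[i]: k = pi[k-1]' loop; fuel = len(xs)
-- suffices since k strictly decreases (all list indexing here is always in
-- range, so List.getD is exact for Python's xs[k] / pi[k-1]).
def minimalSeqWhile (xs : List Int) (pi : List Nat) (xi : Int) : Nat → Nat → Nat
  | 0, k => k
  | fuel + 1, k =>
    if 0 < k ∧ xs.getD k 0 ≠ xi then minimalSeqWhile xs pi xi fuel (pi.getD (k - 1) 0)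
    else k

-- one body of A's 'for i in range(1, n)' loop
def minimalSeqStep (xs : List Int) (pi : List Nat) (i : Nat) : List Nat :=
  let k := minimalSeqWhile xs pi (xs.getD i 0) xs.length (pi.getD (i - 1) 0)
  pi.set i (if xs.getD k 0 = xs.getD i 0 then k + 1 else 0)

def minimal_seq (xs : List Int) : List Int :=
  -- pi[-1]: Python raises IndexError for xs = [], excluded by Pre_
  xs.take (xs.length -
    (((List.range' 1 (xs.length - 1)).foldl (minimalSeqStep xs)
        (List.replicate xs.length 0)).getD (xs.length - 1) 0))

-- ===== PORT B =====
def minimal_seq_alt (xs : List Int) : List Int :=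
  match ((List.range xs.length).filter
      (fun L => xs.take L == xs.drop (xs.length - L))).max? with
  | some b => xs.take (xs.length - b)
  | none => []   -- Python: max() of an empty generator raises ValueError (xs = []), excluded by Pre_

-- ===== PRECONDITION & SPEC =====
-- Pre_ excludes only the empty list, on which A raises IndexError (and B raises ValueError).
def Pre_minimal_seq (xs : List Int) : Prop := xs ≠ []
instance (xs : List Int) : Decidable (Pre_minimal_seq xs) := by unfold Pre_minimal_seq; infer_instance
def pvWitness_minimal_seq : List Int := [1, 2, 1]

def Spec_minimal_seq (xs : List Int) (out : List Int) : Prop := out = minimal_seq_alt xs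
instance (xs : List Int) (out : List Int) : Decidable (Spec_minimal_seq xs out) := by unfold Spec_minimal_seq; infer_instance

-- ===== CLAIM (what is proved, stated in full; the proofs are below) =====
def Claim_equal_minimal_seq : Prop := ∀ (xs : List Int), Dom_minimal_seq xs → Pre_minimal_seq xs → Spec_minimal_seq xs (minimal_seq xs)

-- ===== LEMMAS AND PROOFS =====

-- `bEq xs i L`: the length-L prefix of xs equals the length-L suffix of xs.take i,
-- expressed pointwise via total indexing.
def bEq (xs : List Int) (i L : Nat) : Prop := ∀ t, t < L → xs.getD t 0 = xs.getD (i - L + t) 0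

-- proper border of the length-i prefix
def Bord (xs : List Int) (i L : Nat) : Prop := L < i ∧ bEq xs i L

def BordB (xs : List Int) (i L : Nat) : Bool :=
  decide (L < i) && decide (∀ t, t < L → xs.getD t 0 = xs.getD (i - L + t) 0)

theorem bordB_iff (xs : List Int) (i L : Nat) : BordB xs i L = true ↔ Bord xs i L := by
  simp [BordB, Bord, bEq]

-- longest proper border of the length-i prefix (0 if i = 0)
def beta (xs : List Int) (i : Nat) : Nat := Nat.findGreatest (fun L => BordB xs i L = true) (i - 1)

theorem bord_zero (xs : List Int) (i : Nat) (hi : 1 ≤ i) : Bord xs i 0 :=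
  ⟨hi, fun t ht => absurd ht (Nat.not_lt_zero t)⟩

theorem beta_le (xs : List Int) (i : Nat) : beta xs i ≤ i - 1 := Nat.findGreatest_le _

theorem beta_bord (xs : List Int) (i : Nat) (hi : 1 ≤ i) : Bord xs i (beta xs i) := by
  have h0 : BordB xs i 0 = true := (bordB_iff xs i 0).mpr (bord_zero xs i hi)
  have h := Nat.findGreatest_spec (m := 0) (n := i - 1)
    (P := fun L => BordB xs i L = true) (Nat.zero_le _) h0
  exact (bordB_iff xs i _).mp h

theorem le_beta (xs : List Int) (i L : Nat) (h : Bord xs i L) : L ≤ beta xs i := by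
  obtain ⟨h1, _⟩ := h
  exact Nat.le_findGreatest (by omega) ((bordB_iff xs i L).mpr ⟨h1, ‹_›⟩)

-- nesting: a shorter border is a border of a longer border
theorem bord_nest (xs : List Int) (i L L' : Nat) (hL : Bord xs i L) (hL' : Bord xs i L')
    (hlt : L' < L) : Bord xs L L' := by
  obtain ⟨hL1, hL2⟩ := hL
  obtain ⟨hL'1, hL'2⟩ := hL'
  refine ⟨hlt, fun t ht => ?_⟩
  have h1 := hL2 (L - L' + t) (by omega)
  have h2 := hL'2 t ht
  have e1 : i - L + (L - L' + t) = i - L' + t := by omega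
  rw [h2, ← e1, ← h1]

-- transitivity: a border of a border is a border
theorem bord_trans (xs : List Int) (i k b : Nat) (hk : Bord xs i k) (hb : Bord xs k b) :
    Bord xs i b := by
  obtain ⟨hk1, hk2⟩ := hk
  obtain ⟨hb1, hb2⟩ := hb
  refine ⟨by omega, fun t ht => ?_⟩
  have h1 := hb2 t ht
  have h2 := hk2 (k - b + t) (by omega)
  have e1 : i - k + (k - b + t) = i - b + t := by omega
  rw [h1, h2, e1]

-- extension: borders of the (i+1)-prefix of positive length
theorem bord_ext (xs : List Int) (i L : Nat) (hL : L < i) :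
    Bord xs (i + 1) (L + 1) ↔ Bord xs i L ∧ xs.getD L 0 = xs.getD i 0 := by
  constructor
  · rintro ⟨_, hb⟩
    refine ⟨⟨hL, fun t ht => ?_⟩, ?_⟩
    · have h := hb t (by omega)
      have e1 : i + 1 - (L + 1) + t = i - L + t := by omega
      rwa [e1] at h
    · have h := hb L (by omega)
      have e1 : i + 1 - (L + 1) + L = i := by omega
      rwa [e1] at h
  · rintro ⟨⟨_, hb⟩, hx⟩
    refine ⟨by omega, fun t ht => ?_⟩
    have e1 : i + 1 - (L + 1) + t = i - L + t := by omega
    rw [e1]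
    rcases Nat.lt_or_ge t L with h | h
    · exact hb t h
    · have ht' : t = L := by omega
      subst ht'
      have e2 : i - t + t = i := by omega
      rw [e2]; exact hx

-- correctness of the while loop
theorem whileSpec (xs : List Int) (pi : List Nat) (i : Nat) (_hi : 1 ≤ i)
    (Hpi : ∀ j, j < i → pi.getD j 0 = beta xs (j + 1)) :
    ∀ fuel k, k ≤ fuel → Bord xs i k →
      (∀ L, Bord xs i L → xs.getD L 0 = xs.getD i 0 → L ≤ k) →
      (Bord xs i (minimalSeqWhile xs pi (xs.getD i 0) fuel k) ∧
       (∀ L, Bord xs i L → xs.getD L 0 = xs.getD i 0 →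
          L ≤ minimalSeqWhile xs pi (xs.getD i 0) fuel k) ∧
       (minimalSeqWhile xs pi (xs.getD i 0) fuel k = 0 ∨
        xs.getD (minimalSeqWhile xs pi (xs.getD i 0) fuel k) 0 = xs.getD i 0)) := by
  intro fuel
  induction fuel with
  | zero =>
    intro k hk hb hmax
    have hk0 : k = 0 := by omega
    subst hk0
    exact ⟨hb, hmax, Or.inl rfl⟩
  | succ fuel ih =>
    intro k hk hb hmax
    by_cases hc : 0 < k ∧ xs.getD k 0 ≠ xs.getD i 0
    · rw [minimalSeqWhile, if_pos hc]
      have hki : k < i := hb.1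
      have hkk : k - 1 + 1 = k := by omega
      have hpk : pi.getD (k - 1) 0 = beta xs k := by
        have h := Hpi (k - 1) (by omega); rwa [hkk] at h
      rw [hpk]
      have hbk : Bord xs k (beta xs k) := beta_bord xs k (by omega)
      apply ih
      · have := beta_le xs k; omega
      · exact bord_trans xs i k (beta xs k) hb hbk
      · intro L hL hx
        have hLk : L ≤ k := hmax L hL hx
        have hLne : L ≠ k := by
          intro h; subst h; exact hc.2 hx
        exact le_beta xs k L (bord_nest xs i k L hb hL (by omega))
    · rw [minimalSeqWhile, if_neg hc]
      refine ⟨hb, hmax, ?_⟩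
      by_cases h0 : k = 0
      · exact Or.inl h0
      · right
        by_contra hne
        exact hc ⟨by omega, hne⟩

-- one iteration of the for loop computes beta (i+1) at slot i
theorem stepSpec (xs : List Int) (pi : List Nat) (i : Nat) (hi : 1 ≤ i)
    (hin : i < xs.length)
    (Hpi : ∀ j, j < i → pi.getD j 0 = beta xs (j + 1)) :
    (if xs.getD (minimalSeqWhile xs pi (xs.getD i 0) xs.length (pi.getD (i - 1) 0)) 0
        = xs.getD i 0
     then minimalSeqWhile xs pi (xs.getD i 0) xs.length (pi.getD (i - 1) 0) + 1
     else 0) = beta xs (i + 1) := by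
  have hstart : pi.getD (i - 1) 0 = beta xs i := by
    have h := Hpi (i - 1) (by omega)
    have e : i - 1 + 1 = i := by omega
    rwa [e] at h
  have hb0 : Bord xs i (beta xs i) := beta_bord xs i hi
  have hfuel : beta xs i ≤ xs.length := by
    have h1 := beta_le xs i
    omega
  obtain ⟨hbr, hmaxr, hexit⟩ :=
    whileSpec xs pi i hi Hpi xs.length (beta xs i) hfuel hb0
      (fun L hL _ => le_beta xs i L hL)
  rw [hstart]
  set r := minimalSeqWhile xs pi (xs.getD i 0) xs.length (beta xs i) with hr
  by_cases hx : xs.getD r 0 = xs.getD i 0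
  · rw [if_pos hx]
    apply Nat.le_antisymm
    · exact le_beta xs (i + 1) (r + 1) ((bord_ext xs i r hbr.1).mpr ⟨hbr, hx⟩)
    · have hbb : Bord xs (i + 1) (beta xs (i + 1)) := beta_bord xs (i + 1) (by omega)
      set b := beta xs (i + 1) with hbdef
      rcases Nat.eq_zero_or_pos b with h0 | hpos
      · omega
      · have hb1 : b - 1 < i := by have := hbb.1; omega
        have hbb' : Bord xs (i + 1) (b - 1 + 1) := by
          have e : b - 1 + 1 = b := by omega
          rwa [e]
        obtain ⟨hbord, hxb⟩ := (bord_ext xs i (b - 1) hb1).mp hbb'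
        have := hmaxr (b - 1) hbord hxb
        omega
  · rw [if_neg hx]
    have hr0 : r = 0 := by
      rcases hexit with h | h
      · exact h
      · exact absurd h hx
    symm
    by_contra hne
    have hpos : 0 < beta xs (i + 1) := Nat.pos_of_ne_zero hne
    have hbb : Bord xs (i + 1) (beta xs (i + 1)) := beta_bord xs (i + 1) (by omega)
    set b := beta xs (i + 1) with hbdef
    have hb1 : b - 1 < i := by have := hbb.1; omega
    have hbb' : Bord xs (i + 1) (b - 1 + 1) := by
      have e : b - 1 + 1 = b := by omega
      rwa [e]
    obtain ⟨hbord, hxb⟩ := (bord_ext xs i (b - 1) hb1).mp hbb'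
    have hle := hmaxr (b - 1) hbord hxb
    have hb0' : b - 1 = 0 := by omega
    rw [hb0'] at hxb
    rw [hr0] at hx
    exact hx hxb

-- the fold establishes pi.getD j 0 = beta (j+1) for all j < n
theorem foldSpec (xs : List Int) :
    ∀ (c s : Nat) (pi : List Nat), 1 ≤ s → s + c = xs.length → pi.length = xs.length →
      (∀ j, j < s → pi.getD j 0 = beta xs (j + 1)) →
      (∀ j, j < xs.length →
        ((List.range' s c).foldl (minimalSeqStep xs) pi).getD j 0 = beta xs (j + 1)) := by
  intro c
  induction c with
  | zero =>
    intro s pi hs hsum hlen Hpi j hj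
    simp only [List.range'_zero, List.foldl_nil]
    exact Hpi j (by omega)
  | succ c ih =>
    intro s pi hs hsum hlen Hpi j hj
    rw [List.range'_succ, List.foldl_cons]
    refine ih (s + 1) (minimalSeqStep xs pi s) (by omega) (by omega) ?_ ?_ j hj
    · simp [minimalSeqStep, hlen]
    · intro j' hj'
      unfold minimalSeqStep
      rcases Nat.lt_or_ge j' s with h | h
      · rw [List.getD_eq_getElem?_getD, List.getElem?_set_ne (by omega),
          ← List.getD_eq_getElem?_getD]
        exact Hpi j' h
      · have hjs : j' = s := by omega
        subst hjs
        rw [List.getD_eq_getElem?_getD, List.getElem?_set_self (by omega),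
          Option.getD_some]
        exact stepSpec xs pi j' hs (by omega) Hpi

theorem portA_eq (xs : List Int) (h : xs ≠ []) :
    minimal_seq xs = xs.take (xs.length - beta xs xs.length) := by
  have hn : 1 ≤ xs.length := List.length_pos_of_ne_nil h
  unfold minimal_seq
  congr 2
  have hfold := foldSpec xs (xs.length - 1) 1 (List.replicate xs.length 0) le_rfl
    (by omega) (by simp) ?_ (xs.length - 1) (by omega)
  · rw [hfold]
    congr 1
    omega
  · intro j hj
    have hj0 : j = 0 := by omega
    subst hj0
    have h1 : (List.replicate xs.length (0 : Nat)).getD 0 0 = 0 := by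
      simp [List.getD_eq_getElem?_getD]
    rw [h1]
    simp [beta, Nat.findGreatest]

-- bridge: the slice comparison in B is exactly bEq at the full length
theorem slice_iff_bEq (xs : List Int) (L : Nat) (hL : L < xs.length) :
    (xs.take L = xs.drop (xs.length - L)) ↔ bEq xs xs.length L := by
  constructor
  · intro h t ht
    have h1 : (xs.take L).getD t 0 = (xs.drop (xs.length - L)).getD t 0 := by rw [h]
    rw [List.getD_eq_getElem?_getD, List.getD_eq_getElem?_getD] at h1
    rw [List.getElem?_take, List.getElem?_drop] at h1
    simp only [if_pos ht] at h1
    rw [List.getD_eq_getElem?_getD, List.getD_eq_getElem?_getD]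
    exact h1
  · intro h
    apply List.ext_getElem
    · simp; omega
    · intro t h1 h2
      have ht : t < L := by simp at h1; omega
      have h3 := h t ht
      rw [List.getD_eq_getElem?_getD, List.getD_eq_getElem?_getD,
        List.getElem?_eq_getElem (by omega), List.getElem?_eq_getElem (by omega)] at h3
      simp only [Option.getD_some] at h3
      simpa [List.getElem_take, List.getElem_drop] using h3

theorem portB_eq (xs : List Int) (h : xs ≠ []) :
    minimal_seq_alt xs = xs.take (xs.length - beta xs xs.length) := by
  have hn : 1 ≤ xs.length := List.length_pos_of_ne_nil h
  have hmem : ∀ L, (L ∈ (List.range xs.length).filter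
      (fun L => xs.take L == xs.drop (xs.length - L))) ↔ Bord xs xs.length L := by
    intro L
    rw [List.mem_filter, List.mem_range]
    constructor
    · rintro ⟨h1, h2⟩
      exact ⟨h1, (slice_iff_bEq xs L h1).mp (by simpa using h2)⟩
    · rintro ⟨h1, h2⟩
      exact ⟨h1, by simpa using (slice_iff_bEq xs L h1).mpr h2⟩
  have hmax : ((List.range xs.length).filter
      (fun L => xs.take L == xs.drop (xs.length - L))).max? = some (beta xs xs.length) := by
    rw [List.max?_eq_some_iff]
    constructor
    · exact (hmem _).mpr (beta_bord xs xs.length hn)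
    · intro b hb
      exact le_beta xs xs.length b ((hmem b).mp hb)
  unfold minimal_seq_alt
  rw [hmax]

-- ===== VERDICT (by name: the statement is the Claim_ definition above) =====
theorem minimal_seq_spec : Claim_equal_minimal_seq := by
  intro xs _ hpre
  unfold Spec_minimal_seq
  rw [portA_eq xs hpre, portB_eq xs hpre]
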